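-- pv_equiv track=rewrite | github.com/daniel-reich/ubiquitous-fiesta | vCRP3WXbJ9erKFsiK_5.py | dif_ciph2
-- ===== SOURCE A (Python) =====
-- def dif_ciph2(inpt):
--     z,res=[],''
--     a=inpt[0]+inpt[1]
--     z.append(inpt[0])
--     z.append(a)
--     for i in range(2,len(inpt)):
--         if type(inpt[i])==int:
--             b=inpt[i]+a
--             z.append(b)
--             a=b
--     for i in z:
--         res+=chr(i)
--     return res
-- ===== SOURCE B (Python) =====
-- def dif_ciph2(inpt):
--     # closed form: the k-th output char encodes the sum of the first k+1 elements
--     return ''.join(chr(sum(inpt[:k + 1])) for k in range(len(inpt)))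
-- ===== Notes on version B (the rewrite author's own statement) =====
-- stated objective: simpler
-- what changed: A interleaves a running-sum accumulator with list appends and then renders with a += loop; B is a one-line closed form that maps each index k to chr of the sum of the first k+1 elements and joins.
import Mathlib
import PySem

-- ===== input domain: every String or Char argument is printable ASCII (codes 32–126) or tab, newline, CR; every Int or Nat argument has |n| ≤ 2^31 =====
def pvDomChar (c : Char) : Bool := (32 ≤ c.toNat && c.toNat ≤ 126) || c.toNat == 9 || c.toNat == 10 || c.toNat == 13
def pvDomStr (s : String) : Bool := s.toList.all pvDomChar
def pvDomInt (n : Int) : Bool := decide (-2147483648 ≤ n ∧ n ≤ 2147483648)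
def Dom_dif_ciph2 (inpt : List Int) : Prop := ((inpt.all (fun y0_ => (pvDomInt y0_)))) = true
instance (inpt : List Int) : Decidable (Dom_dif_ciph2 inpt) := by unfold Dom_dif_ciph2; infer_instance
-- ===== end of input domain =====

-- B replaces A's interleaved running-sum/append loop by a one-line closed form
-- (char k = chr of the sum of the first k+1 elements); objective: simpler, not faster.

-- ===== PORT A =====
-- chr(i): exact for code points Pre_ admits (0 ≤ i, not a surrogate, < 0x110000)
def pyChrA (i : Int) : Char := Char.ofNat i.toNat

def dif_ciph2 (inpt : List Int) : String :=
  -- z,res=[],''; a=inpt[0]+inpt[1]; z=[inpt[0],a]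
  let x0 := PySem.List.pyGetD inpt 0 0
  let a := x0 + PySem.List.pyGetD inpt 1 0
  let z : List Int := [x0, a]
  -- for i in range(2,len(inpt)): (type(inpt[i])==int is always true for Int)
  let za := (PySem.List.pyRange 2 (inpt.length : Int) 1).foldl
      (fun (st : List Int × Int) i =>
        let b := PySem.List.pyGetD inpt i 0 + st.2
        (st.1 ++ [b], b)) (z, a)
  -- for i in z: res += chr(i)
  String.mk (za.1.foldl (fun r i => r ++ [pyChrA i]) [])

-- ===== PORT B =====
def dif_ciph2_alt (inpt : List Int) : String :=
  -- ''.join(chr(sum(inpt[:k+1])) for k in range(len(inpt)))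
  String.mk ((PySem.List.pyRange 0 (inpt.length : Int) 1).map
    (fun k => Char.ofNat ((PySem.List.slice inpt none (some (k + 1))).sum).toNat))

-- ===== PRECONDITION & SPEC =====
-- a prefix sum s is a value chr accepts and Lean's Char can hold (no lone surrogates)
def validCp (s : Int) : Bool := decide (0 ≤ s ∧ (s < 55296 ∨ (57344 ≤ s ∧ s < 1114112)))

-- Pre_ excludes (i) lists of length < 2, where A raises IndexError, (ii) inputs whose
-- prefix sums leave chr's range, where A raises ValueError, and (iii) prefix sums in the
-- surrogate range 0xD800–0xDFFF, where Python's chr returns a lone surrogate that is not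
-- a Unicode scalar value (not representable as a Lean Char / in UTF-8).
def Pre_dif_ciph2 (inpt : List Int) : Prop :=
  2 ≤ inpt.length ∧ ∀ k ∈ List.range inpt.length, validCp ((inpt.take (k + 1)).sum) = true
instance (inpt : List Int) : Decidable (Pre_dif_ciph2 inpt) := by
  unfold Pre_dif_ciph2; infer_instance

def pvWitness_dif_ciph2 : List Int := [104, 1, 3]

def Spec_dif_ciph2 (inpt : List Int) (out : String) : Prop := out = dif_ciph2_alt inpt
instance (inpt : List Int) (out : String) : Decidable (Spec_dif_ciph2 inpt out) := by unfold Spec_dif_ciph2; infer_instance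

-- ===== CLAIM (what is proved, stated in full; the proofs are below) =====
def Claim_equal_dif_ciph2 : Prop := ∀ (inpt : List Int), Dom_dif_ciph2 inpt → Pre_dif_ciph2 inpt → Spec_dif_ciph2 inpt (dif_ciph2 inpt)

-- ===== LEMMAS AND PROOFS =====

-- the list of running sums A accumulates, starting from accumulator a
def accumFrom (a : Int) : List Int → List Int
  | [] => []
  | v :: t => (v + a) :: accumFrom (v + a) t

theorem foldl_accum (vs : List Int) :
    ∀ (z : List Int) (a : Int),
    (vs.foldl (fun (st : List Int × Int) v => (st.1 ++ [v + st.2], v + st.2)) (z, a)).1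
      = z ++ accumFrom a vs := by
  induction vs with
  | nil => intro z a; simp [accumFrom]
  | cons v t ih =>
      intro z a
      simp only [List.foldl_cons, accumFrom]
      rw [ih]
      simp

theorem range_map_prefix_sums (vs : List Int) :
    ∀ (a : Int),
    (List.range vs.length).map (fun k => (vs.take (k + 1)).sum + a) = accumFrom a vs := by
  induction vs with
  | nil => intro a; simp [accumFrom]
  | cons v t ih =>
      intro a
      simp only [List.length_cons, List.range_succ_eq_map, List.map_cons, List.map_map,
        accumFrom]
      congr 1
      · simp
      · rw [← ih (v + a)]
        apply List.map_congr_left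
        intro k _
        simp [List.take_succ_cons, List.sum_cons]
        ring

theorem dif_ciph2_spec : Claim_equal_dif_ciph2 := by
  intro inpt _hdom hpre
  unfold Spec_dif_ciph2
  obtain ⟨hlen, _⟩ := hpre
  match inpt, hlen with
  | x0 :: x1 :: rest, _ =>
    show dif_ciph2 (x0 :: x1 :: rest) = dif_ciph2_alt (x0 :: x1 :: rest)
    simp only [dif_ciph2, dif_ciph2_alt]
    -- A side: resolve the two indexed reads
    have h0 : PySem.List.pyGetD (x0 :: x1 :: rest) 0 0 = x0 := by
      rw [PySem.List.pyGetD_ofNat']; rfl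
    have h1 : PySem.List.pyGetD (x0 :: x1 :: rest) 1 0 = x1 := by
      rw [PySem.List.pyGetD_ofNat']; rfl
    rw [h0, h1]
    -- A's index loop is a fold over drop 2 = rest
    rw [PySem.List.foldl_pyRange_pyGetD' (x0 :: x1 :: rest) 0
      (fun (st : List Int × Int) v => (st.1 ++ [v + st.2], v + st.2))
      ([x0, x0 + x1], x0 + x1) (a := 2) (by omega)]
    rw [show List.drop (Int.toNat 2) (x0 :: x1 :: rest) = rest from rfl]
    rw [foldl_accum]
    -- A's render loop is a map
    rw [PySem.List.foldl_append_singleton_eq_map]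
    -- B side: pyRange 0 n 1 over the natural range, slice = take
    rw [PySem.List.pyRange_zero_nat (x0 :: x1 :: rest).length, List.map_map]
    have hB : (List.range (x0 :: x1 :: rest).length).map
        (fun k => ((x0 :: x1 :: rest).take (k + 1)).sum + 0)
        = x0 :: (x0 + x1) :: accumFrom (x0 + x1) rest := by
      have h := range_map_prefix_sums (x0 :: x1 :: rest) 0
      simp only [accumFrom, add_zero] at h
      simp only [add_comm x1 x0] at h
      simpa using h
    have hmap : ((List.range (x0 :: x1 :: rest).length).map
        ((fun k => Char.ofNat ((PySem.List.slice (x0 :: x1 :: rest) none (some (k + 1))).sum).toNat)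
          ∘ (fun k : Nat => (k : Int))))
        = (x0 :: (x0 + x1) :: accumFrom (x0 + x1) rest).map (fun i => Char.ofNat i.toNat) := by
      rw [← hB, List.map_map]
      apply List.map_congr_left
      intro k _
      simp only [Function.comp_apply]
      rw [PySem.List.slice_to _ (by omega), show ((k : Int) + 1).toNat = k + 1 by omega]
      simp
    rw [hmap, show pyChrA = (fun i : Int => Char.ofNat i.toNat) from rfl]
    simp
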